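-- pv_equiv track=rewrite | github.com/ppkapiro/runart-foundry | tools/phase4_apply_ui_corrections.py | build_color_mapping
-- ===== SOURCE A (Python) =====
-- from typing import Dict, List, Tuple
--
-- TOKEN_PALETTE = [
--     ("--color-primary", "#1a73e8"),
--     ("--color-secondary", "#6c757d"),
--     ("--color-accent", "#ff6d00"),
--     ("--color-success", "#2e7d32"),
--     ("--color-warning", "#ed6c02"),
--     ("--color-danger", "#d32f2f"),
--     ("--text-primary", "#111111"),
--     ("--text-secondary", "#555555"),
--     ("--bg-surface", "#ffffff"),
-- ]
--
-- def build_color_mapping(colors: List[str]) -> Dict[str, str]: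
--     mapping: Dict[str, str] = {}
--     palette_iter = iter(TOKEN_PALETTE)
--     for c in colors:
--         if c not in mapping:
--             try:
--                 token, default = next(palette_iter)
--             except StopIteration:
--                 # si se agota la paleta, crear token incremental
--                 token = f"--color-{len(mapping)+1}"
--             mapping[c] = token
--     return mapping
-- ===== SOURCE B (Python) =====
-- from typing import Dict, List
--
-- TOKEN_PALETTE = [
--     ("--color-primary", "#1a73e8"),
--     ("--color-secondary", "#6c757d"),
--     ("--color-accent", "#ff6d00"),
--     ("--color-success", "#2e7d32"),
--     ("--color-warning", "#ed6c02"),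
--     ("--color-danger", "#d32f2f"),
--     ("--text-primary", "#111111"),
--     ("--text-secondary", "#555555"),
--     ("--bg-surface", "#ffffff"),
-- ]
--
-- def build_color_mapping(colors: List[str]) -> Dict[str, str]:
--     # Record each color's first-occurrence position, order colors by that position,
--     # and assign the r-th color in that order the r-th palette name (or the
--     # incremental fallback token once the palette is exhausted).
--     first: Dict[str, int] = {}
--     for p, c in enumerate(colors):
--         first.setdefault(c, p)
--     names = [t for t, _ in TOKEN_PALETTE]
--     ordered = sorted(first.items(), key=lambda kv: kv[1])
--     return {c: (names[r] if r < len(names) else f"--color-{r+1}")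
--             for r, (c, _) in enumerate(ordered)}
-- ===== Notes on version B (the rewrite author's own statement) =====
-- stated objective: alternative
-- what changed: A makes one pass that interleaves a membership test on the accumulating dict with consuming a palette iterator (StopIteration fallback keyed to the dict's current size); B instead records each color's first-occurrence position with setdefault, sorts the (color, position) pairs by position, and assigns tokens purely positionally from the sorted order.
import Mathlib
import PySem

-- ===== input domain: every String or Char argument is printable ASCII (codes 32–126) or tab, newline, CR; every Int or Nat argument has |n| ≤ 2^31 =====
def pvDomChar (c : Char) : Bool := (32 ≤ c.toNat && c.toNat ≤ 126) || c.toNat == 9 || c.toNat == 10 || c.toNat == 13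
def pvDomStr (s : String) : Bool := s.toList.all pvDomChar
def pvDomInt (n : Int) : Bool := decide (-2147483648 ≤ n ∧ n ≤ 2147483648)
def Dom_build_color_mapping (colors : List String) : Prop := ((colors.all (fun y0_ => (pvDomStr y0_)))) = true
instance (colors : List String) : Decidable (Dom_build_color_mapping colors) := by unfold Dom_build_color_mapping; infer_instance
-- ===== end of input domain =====

-- B records first-occurrence positions, sorts (color, position) pairs by position and assigns
-- tokens positionally, instead of A's dict-membership pass consuming a palette iterator; objective: alternative.

-- ===== PORT A =====
def TOKEN_PALETTE : List (String × String) := [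
  ("--color-primary", "#1a73e8"),
  ("--color-secondary", "#6c757d"),
  ("--color-accent", "#ff6d00"),
  ("--color-success", "#2e7d32"),
  ("--color-warning", "#ed6c02"),
  ("--color-danger", "#d32f2f"),
  ("--text-primary", "#111111"),
  ("--text-secondary", "#555555"),
  ("--bg-surface", "#ffffff")]

-- A's loop body: state = (mapping so far, remainder of the palette iterator)
def pvStepA (st : PySem.Dict String String × List (String × String)) (c : String) :
    PySem.Dict String String × List (String × String) :=
  if st.1.contains c then st
  else
    match st.2 with
    | td :: rest => (st.1.insert c td.1, rest)
    | [] => (st.1.insert c ("--color-" ++ PySem.Int.toStr ((st.1.size : Int) + 1)), [])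

def build_color_mapping (colors : List String) : List (String × String) :=
  (colors.foldl pvStepA (PySem.Dict.empty, TOKEN_PALETTE)).1.items

-- ===== PORT B =====
-- names = [t for t, _ in TOKEN_PALETTE]
def pvNames : List String := TOKEN_PALETTE.map (fun t => t.1)

-- first: each color's first-occurrence position, via setdefault over enumerate(colors)
def pvFirstD (colors : List String) : PySem.Dict String Int :=
  (PySem.List.enumerate colors 0).foldl (fun d pc => d.setdefault pc.2 pc.1) PySem.Dict.empty

-- ordered = sorted(first.items(), key=lambda kv: kv[1])
def pvOrdered (colors : List String) : List (String × Int) :=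
  PySem.List.sorted (pvFirstD colors).items (fun kv => kv.2) false

-- the final dict comprehension over enumerate(ordered)
def build_color_mapping_alt (colors : List String) : List (String × String) :=
  ((PySem.List.enumerate (pvOrdered colors) 0).foldl
    (fun m rp => m.insert rp.2.1
      (if rp.1 < (pvNames.length : Int)
       then PySem.List.pyGetD pvNames rp.1 ""
       else "--color-" ++ PySem.Int.toStr (rp.1 + 1)))
    PySem.Dict.empty).items

-- ===== PRECONDITION & SPEC =====
def Spec_build_color_mapping (colors : List String) (out : List (String × String)) : Prop := out = build_color_mapping_alt colors
instance (colors : List String) (out : List (String × String)) : Decidable (Spec_build_color_mapping colors out) := by unfold Spec_build_color_mapping; infer_instance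

-- ===== CLAIM (what is proved, stated in full; the proofs are below) =====
def Claim_equal_build_color_mapping : Prop := ∀ (colors : List String), Dom_build_color_mapping colors → Spec_build_color_mapping colors (build_color_mapping colors)

-- ===== LEMMAS AND PROOFS =====

-- the token assigned to the i-th distinct color (0-based)
def pvTok (i : Nat) : String :=
  if i < TOKEN_PALETTE.length then (TOKEN_PALETTE.getD i ("", "")).1
  else "--color-" ++ PySem.Int.toStr ((i : Int) + 1)

-- the mapping built over the distinct colors u, i-th getting pvTok (s + i)
def pvMapTok : List String → Nat → List (String × String)
  | [], _ => []
  | c :: cs, s => (c, pvTok s) :: pvMapTok cs (s + 1)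

theorem pvMapTok_length (u : List String) (s : Nat) : (pvMapTok u s).length = u.length := by
  induction u generalizing s with
  | nil => rfl
  | cons c cs ih => simp [pvMapTok, ih]

theorem pvMapTok_append (u : List String) (c : String) (s : Nat) :
    pvMapTok (u ++ [c]) s = pvMapTok u s ++ [(c, pvTok (s + u.length))] := by
  induction u generalizing s with
  | nil => simp [pvMapTok]
  | cons a as ih => simp [pvMapTok, ih]; ring_nf

theorem pvMapTok_containsKey (u : List String) (s : Nat) (c : String) :
    ((pvMapTok u s).any fun p => p.1 == c) = u.contains c := by
  induction u generalizing s with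
  | nil => rfl
  | cons a as ih =>
    simp only [pvMapTok, List.any_cons, ih, List.contains_cons]
    rw [Bool.eq_iff_iff]
    simp
    tauto

theorem pvA_loop (cs : List String) (u : List String) :
    cs.foldl pvStepA (PySem.Dict.mk (pvMapTok u 0), TOKEN_PALETTE.drop u.length)
      = (PySem.Dict.mk (pvMapTok (cs.foldl PySem.Set.add u) 0),
         TOKEN_PALETTE.drop (cs.foldl PySem.Set.add u).length) := by
  induction cs generalizing u with
  | nil => rfl
  | cons c rest ih =>
    simp only [List.foldl_cons]
    have hstep : pvStepA (PySem.Dict.mk (pvMapTok u 0), TOKEN_PALETTE.drop u.length) c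
        = (PySem.Dict.mk (pvMapTok (PySem.Set.add u c) 0),
           TOKEN_PALETTE.drop (PySem.Set.add u c).length) := by
      have hcont : (PySem.Dict.mk (pvMapTok u 0)).contains c = u.contains c := by
        rw [PySem.Dict.contains_mk]
        exact pvMapTok_containsKey u 0 c
      by_cases hc : c ∈ u
      · simp [pvStepA, hcont, PySem.Set.add, PySem.Set.contains, hc]
      · have hcf : u.contains c = false := by
          simp only [List.contains_eq_mem, decide_eq_false_iff_not]
          exact hc
        have hadd : PySem.Set.add u c = u ++ [c] := by
          simp [PySem.Set.add, PySem.Set.contains, hc]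
        have hnotc : (PySem.Dict.mk (pvMapTok u 0)).contains c = false := by
          rw [hcont, hcf]
        by_cases hlen : u.length < TOKEN_PALETTE.length
        · have hdrop : TOKEN_PALETTE.drop u.length
              = TOKEN_PALETTE[u.length] :: TOKEN_PALETTE.drop (u.length + 1) :=
            List.drop_eq_getElem_cons hlen
          simp only [pvStepA, hnotc, Bool.false_eq_true, if_false, hdrop]
          apply Prod.ext <;> dsimp only
          · apply PySem.Dict.ext
            simp only [PySem.Dict.items_insert, hnotc, Bool.false_eq_true, if_false]
            rw [hadd, pvMapTok_append]
            simp [pvTok, hlen, List.getD_eq_getElem?_getD]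
          · simp [hadd]
        · have h9 : TOKEN_PALETTE.length ≤ u.length := Nat.le_of_not_lt hlen
          have hdrop : TOKEN_PALETTE.drop u.length = [] := List.drop_eq_nil_of_le h9
          simp only [pvStepA, hnotc, Bool.false_eq_true, if_false, hdrop]
          apply Prod.ext <;> dsimp only
          · apply PySem.Dict.ext
            simp only [PySem.Dict.items_insert, hnotc, Bool.false_eq_true, if_false]
            rw [hadd, pvMapTok_append]
            have hsize : (PySem.Dict.mk (pvMapTok u 0)).size = u.length := by
              simp [PySem.Dict.size, pvMapTok_length]
            simp [pvTok, hlen, hsize]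
          · rw [hadd]
            simp
            omega
    rw [hstep, ih]

-- B's token expression at rank r equals pvTok r
theorem pvTokB (r : Nat) :
    (if (r : Int) < (pvNames.length : Int)
     then PySem.List.pyGetD pvNames (r : Int) ""
     else "--color-" ++ PySem.Int.toStr ((r : Int) + 1)) = pvTok r := by
  by_cases h : r < TOKEN_PALETTE.length
  · rw [if_pos (by simp [pvNames]; exact_mod_cast h)]
    simp only [pvTok, if_pos h, PySem.List.pyGetD_natCast, pvNames]
    rw [List.getD_eq_getElem?_getD, List.getD_eq_getElem?_getD,
      List.getElem?_map, List.getElem?_eq_getElem h]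
    rfl
  · rw [if_neg (by simp [pvNames]; omega), pvTok, if_neg h]

-- the (color, first position) pairs produced by B's setdefault loop, relative to already-seen colors
def pvFL : List String → List String → Int → List (String × Int)
  | _, [], _ => []
  | seen, c :: cs, p =>
    if c ∈ seen then pvFL seen cs (p + 1)
    else (c, p) :: pvFL (seen ++ [c]) cs (p + 1)

theorem pvFirst_loop (rest : List String) (L : List (String × Int)) (s : Int) :
    (PySem.List.enumerate rest s).foldl (fun d pc => d.setdefault pc.2 pc.1) (PySem.Dict.mk L)
      = PySem.Dict.mk (L ++ pvFL (L.map Prod.fst) rest s) := by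
  induction rest generalizing L s with
  | nil => simp [pvFL]
  | cons c cs ih =>
    rw [PySem.List.enumerate_cons, List.foldl_cons]
    by_cases hc : c ∈ L.map Prod.fst
    · have hcont : (PySem.Dict.mk L).contains c = true := by
        rw [PySem.Dict.contains_mk]
        simp only [List.any_eq_true]
        obtain ⟨p, hp, he⟩ := List.mem_map.mp hc
        exact ⟨p, hp, by simp [he]⟩
      rw [PySem.Dict.setdefault_of_contains _ _ hcont, ih, pvFL, if_pos hc]
    · have hcont : (PySem.Dict.mk L).contains c = false := by
        rw [PySem.Dict.contains_mk, List.any_eq_false]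
        intro p hp he
        exact hc (List.mem_map.mpr ⟨p, hp, beq_iff_eq.mp he⟩)
      rw [PySem.Dict.setdefault_of_not_contains _ _ hcont]
      have hins : (PySem.Dict.mk L).insert c s = PySem.Dict.mk (L ++ [(c, s)]) := by
        apply PySem.Dict.ext
        rw [PySem.Dict.items_insert, hcont]
        simp
      rw [hins, ih, pvFL, if_neg hc]
      simp

theorem pvFL_fst (rest seen : List String) (s : Int) :
    seen ++ (pvFL seen rest s).map Prod.fst = rest.foldl PySem.Set.add seen := by
  induction rest generalizing seen s with
  | nil => simp [pvFL]
  | cons c cs ih =>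
    rw [List.foldl_cons]
    by_cases hc : c ∈ seen
    · have : PySem.Set.add seen c = seen := by
        simp [PySem.Set.add, PySem.Set.contains, hc]
      rw [pvFL, if_pos hc, this, ih]
    · have hadd : PySem.Set.add seen c = seen ++ [c] := by
        simp [PySem.Set.add, PySem.Set.contains, hc]
      rw [pvFL, if_neg hc, hadd, ← ih (seen ++ [c]) (s + 1)]
      simp

theorem pvFL_pairwise (rest seen : List String) (s : Int) :
    (pvFL seen rest s).Pairwise (fun a b => a.2 < b.2) ∧ ∀ x ∈ pvFL seen rest s, s ≤ x.2 := by
  induction rest generalizing seen s with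
  | nil => simp [pvFL]
  | cons c cs ih =>
    by_cases hc : c ∈ seen
    · rw [pvFL, if_pos hc]
      exact ⟨(ih seen (s + 1)).1, fun x hx => by
        have := (ih seen (s + 1)).2 x hx; omega⟩
    · rw [pvFL, if_neg hc]
      refine ⟨List.Pairwise.cons (fun y hy => ?_) (ih (seen ++ [c]) (s + 1)).1, ?_⟩
      · have := (ih (seen ++ [c]) (s + 1)).2 y hy
        simpa using by omega
      · intro x hx
        rcases List.mem_cons.mp hx with h | h
        · simp [h]
        · have := (ih (seen ++ [c]) (s + 1)).2 x h; omega

-- B's final comprehension over enumerate equals pvMapTok of the keys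
theorem pvEnumTok (L : List (String × Int)) (s : Nat) :
    (PySem.List.enumerate L (s : Int)).map
      (fun rp => (rp.2.1,
        if rp.1 < (pvNames.length : Int)
        then PySem.List.pyGetD pvNames rp.1 ""
        else "--color-" ++ PySem.Int.toStr (rp.1 + 1)))
      = pvMapTok (L.map Prod.fst) s := by
  induction L generalizing s with
  | nil => simp [PySem.List.enumerate_nil, pvMapTok]
  | cons p ps ih =>
    rw [PySem.List.enumerate_cons]
    have hs : ((s : Int) + 1) = ((s + 1 : Nat) : Int) := by push_cast; ring
    rw [hs]
    simp only [List.map_cons, ih, pvMapTok]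
    rw [pvTokB]

-- the items of B's first-occurrence dict
theorem pvFirstD_items (colors : List String) :
    (pvFirstD colors).items = pvFL [] colors 0 := by
  show ((PySem.List.enumerate colors 0).foldl (fun d pc => d.setdefault pc.2 pc.1)
      (PySem.Dict.mk [])).items = _
  rw [pvFirst_loop]
  simp

theorem pvOrdered_eq (colors : List String) :
    pvOrdered colors = pvFL [] colors 0 := by
  unfold pvOrdered
  rw [pvFirstD_items]
  exact PySem.List.sorted_eq_of_perm_of_pairwise_lt _ _ _ (List.Perm.refl _)
    (pvFL_pairwise colors [] 0).1

-- ===== VERDICT (by name: the statement is the Claim_ definition above) =====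
theorem build_color_mapping_spec : Claim_equal_build_color_mapping := by
  intro colors _
  show (colors.foldl pvStepA (PySem.Dict.mk (pvMapTok ([] : List String) 0),
        TOKEN_PALETTE.drop ([] : List String).length)).1.items
      = build_color_mapping_alt colors
  rw [pvA_loop]
  have hfst : (pvOrdered colors).map Prod.fst = colors.foldl PySem.Set.add [] := by
    rw [pvOrdered_eq]
    have := pvFL_fst colors [] 0
    simpa using this
  have hnd : ((pvOrdered colors).map Prod.fst).Nodup := by
    rw [hfst, ← PySem.Set.ofList_eq_foldl, ← PySem.List.dedup_eq_ofList]
    exact PySem.List.nodup_dedup colors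
  unfold build_color_mapping_alt
  rw [PySem.Dict.items_foldl_insert_fresh _ _ _ _
      (fun a _ => PySem.Dict.contains_empty _) ?hnodup]
  case hnodup =>
    have hmap : (PySem.List.enumerate (pvOrdered colors) 0).map (fun rp => rp.2.1)
        = (pvOrdered colors).map Prod.fst := by
      have h2 := PySem.List.map_snd_enumerate (pvOrdered colors) 0
      calc (PySem.List.enumerate (pvOrdered colors) 0).map (fun rp => rp.2.1)
          = (((PySem.List.enumerate (pvOrdered colors) 0).map (fun rp => rp.2)).map Prod.fst) := by
            rw [List.map_map]; rfl
        _ = (pvOrdered colors).map Prod.fst := by rw [h2]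
    rw [hmap]; exact hnd
  have h0 : ((0 : Int)) = ((0 : Nat) : Int) := rfl
  rw [show (PySem.Dict.empty : PySem.Dict String String).items = [] from rfl]
  rw [h0, pvEnumTok, hfst]
  simp
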